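-- pv_equiv track=rewrite | github.com/youngjai12/Algorithm_Study | algorithmSolution/src/hashMap/open_chat_room.py | solution
-- ===== SOURCE A (Python) =====
-- from collections import defaultdict
--
-- def solution(record):
--     answer = []
--     name_tag = defaultdict(str)
--     for rec in record:
--         tmp = rec.split(" ")
--         if tmp[0] == "Enter":
--             answer.append((tmp[1], "님이 들어왔습니다."))
--             name_tag[tmp[1]] = tmp[2]
--         elif tmp[0] == "Leave":
--             answer.append((tmp[1], "님이 나갔습니다."))
--         elif tmp[0] == "Change":
--             name_tag[tmp[1]] = tmp[2]
--     return answer, name_tag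
-- ===== SOURCE B (Python) =====
-- from collections import defaultdict
--
-- MSG = {"Enter": "님이 들어왔습니다.", "Leave": "님이 나갔습니다."}
--
-- def solution(record):
--     # pass 1: final nickname per user, in first-assignment order
--     name_tag = defaultdict(str)
--     for rec in record:
--         t = rec.split(" ")
--         if t[0] in ("Enter", "Change"):
--             name_tag[t[1]] = t[2]
--     # pass 2: the event feed, in record order
--     answer = [(rec.split(" ")[1], MSG[rec.split(" ")[0]])
--               for rec in record if rec.split(" ")[0] in MSG]
--     return answer, name_tag
-- ===== Notes on version B (the rewrite author's own statement) =====
-- stated objective: alternative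
-- what changed: B replaces A's single fused loop by two independent passes: a first loop that builds the name map from Enter/Change records via a membership test, and a comprehension over a message table that produces the event feed; Pre_ excludes records that make A raise IndexError on missing tokens.
import Mathlib
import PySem

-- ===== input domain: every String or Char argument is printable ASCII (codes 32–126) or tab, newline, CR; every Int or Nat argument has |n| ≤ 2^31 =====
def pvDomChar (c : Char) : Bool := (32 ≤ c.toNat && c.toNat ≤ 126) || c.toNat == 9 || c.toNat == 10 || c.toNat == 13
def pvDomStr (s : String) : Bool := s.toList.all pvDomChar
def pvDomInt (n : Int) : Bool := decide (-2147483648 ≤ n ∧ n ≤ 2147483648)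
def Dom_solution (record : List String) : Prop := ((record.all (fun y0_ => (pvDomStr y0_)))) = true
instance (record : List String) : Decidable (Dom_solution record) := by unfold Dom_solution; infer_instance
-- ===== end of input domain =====

-- B restructures A's single fused loop into two independent passes (a name-map pass, then a
-- message-table comprehension for the event feed); same cost, different decomposition.

-- ===== PORT A =====
-- rec.split(" ") = PySem.Str.split? rec " " (always some, the separator is nonempty);
-- tmp[k] is accessed only under Pre_, where the index is in range, so .getD is exact there.
def solution (record : List String) : (List (String × String)) × (List (String × String)) :=
  let st := record.foldl (fun (st : List (String × String) × PySem.Dict String String) rec =>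
    let tmp := (PySem.Str.split? rec " ").getD []
    if tmp.getD 0 "" = "Enter" then
      (st.1 ++ [(tmp.getD 1 "", "님이 들어왔습니다.")], st.2.insert (tmp.getD 1 "") (tmp.getD 2 ""))
    else if tmp.getD 0 "" = "Leave" then
      (st.1 ++ [(tmp.getD 1 "", "님이 나갔습니다.")], st.2)
    else if tmp.getD 0 "" = "Change" then
      (st.1, st.2.insert (tmp.getD 1 "") (tmp.getD 2 ""))
    else st) ([], PySem.Dict.empty)
  (st.1, st.2.items)

-- ===== PORT B =====
def solutionMsg : PySem.Dict String String :=
  PySem.Dict.ofList [("Enter", "님이 들어왔습니다."), ("Leave", "님이 나갔습니다.")]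

def solution_alt (record : List String) : (List (String × String)) × (List (String × String)) :=
  let name_tag := record.foldl (fun (d : PySem.Dict String String) rec =>
    let t := (PySem.Str.split? rec " ").getD []
    if t.getD 0 "" = "Enter" ∨ t.getD 0 "" = "Change" then
      d.insert (t.getD 1 "") (t.getD 2 "")
    else d) PySem.Dict.empty
  let answer := record.filterMap (fun rec =>
    if solutionMsg.contains (((PySem.Str.split? rec " ").getD []).getD 0 "") then
      some (((PySem.Str.split? rec " ").getD []).getD 1 "",
            (solutionMsg.get? (((PySem.Str.split? rec " ").getD []).getD 0 "")).getD "")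
    else none)
  (answer, name_tag.items)

-- ===== PRECONDITION & SPEC =====
-- Pre_ excludes exactly the records on which A raises IndexError: an Enter/Change record with
-- fewer than 3 space-separated tokens, or a Leave record with fewer than 2.
def Pre_solution (record : List String) : Prop :=
  ∀ rec ∈ record,
    ((((PySem.Str.split? rec " ").getD []).getD 0 "" = "Enter" ∨
      ((PySem.Str.split? rec " ").getD []).getD 0 "" = "Change") →
       3 ≤ ((PySem.Str.split? rec " ").getD []).length) ∧
    (((PySem.Str.split? rec " ").getD []).getD 0 "" = "Leave" →
       2 ≤ ((PySem.Str.split? rec " ").getD []).length)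
instance (record : List String) : Decidable (Pre_solution record) := by unfold Pre_solution; infer_instance
def pvWitness_solution : List String :=
  ["Enter u1 Muzi", "Enter u2 Ned", "Leave u1", "Enter u1 Prodo", "Change u2 Ryan"]

def Spec_solution (record : List String) (out : (List (String × String)) × (List (String × String))) : Prop := out = solution_alt record
instance (record : List String) (out : (List (String × String)) × (List (String × String))) : Decidable (Spec_solution record out) := by unfold Spec_solution; infer_instance

-- ===== CLAIM (what is proved, stated in full; the proofs are below) =====
def Claim_equal_solution : Prop := ∀ (record : List String), Dom_solution record → Pre_solution record → Spec_solution record (solution record)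

-- ===== LEMMAS AND PROOFS =====
theorem msg_eq : solutionMsg = PySem.Dict.mk [("Enter", "님이 들어왔습니다."), ("Leave", "님이 나갔습니다.")] := rfl
theorem msg_cE : solutionMsg.contains "Enter" = true := rfl
theorem msg_cL : solutionMsg.contains "Leave" = true := rfl
theorem msg_gE : (solutionMsg.get? "Enter").getD "" = "님이 들어왔습니다." := rfl
theorem msg_gL : (solutionMsg.get? "Leave").getD "" = "님이 나갔습니다." := rfl
theorem msg_not (s : String) (h1 : ¬ s = "Enter") (h2 : ¬ s = "Leave") : solutionMsg.contains s = false := by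
  rw [msg_eq]
  simp [PySem.Dict.contains_mk]
  exact ⟨fun h => h1 h.symm, fun h => h2 h.symm⟩
theorem solution_fold (record : List String) (ans : List (String × String)) (d : PySem.Dict String String) :
    record.foldl (fun (st : List (String × String) × PySem.Dict String String) rec =>
      let tmp := (PySem.Str.split? rec " ").getD []
      if tmp.getD 0 "" = "Enter" then
        (st.1 ++ [(tmp.getD 1 "", "님이 들어왔습니다.")], st.2.insert (tmp.getD 1 "") (tmp.getD 2 ""))
      else if tmp.getD 0 "" = "Leave" then
        (st.1 ++ [(tmp.getD 1 "", "님이 나갔습니다.")], st.2)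
      else if tmp.getD 0 "" = "Change" then
        (st.1, st.2.insert (tmp.getD 1 "") (tmp.getD 2 ""))
      else st) (ans, d)
    = (ans ++ record.filterMap (fun rec =>
         if solutionMsg.contains (((PySem.Str.split? rec " ").getD []).getD 0 "") then
           some (((PySem.Str.split? rec " ").getD []).getD 1 "",
                 (solutionMsg.get? (((PySem.Str.split? rec " ").getD []).getD 0 "")).getD "")
         else none),
       record.foldl (fun (d : PySem.Dict String String) rec =>
         let t := (PySem.Str.split? rec " ").getD []
         if t.getD 0 "" = "Enter" ∨ t.getD 0 "" = "Change" then
           d.insert (t.getD 1 "") (t.getD 2 "")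
         else d) d) := by
  induction record generalizing ans d with
  | nil => simp
  | cons rec rest ih =>
    simp only [List.foldl_cons, List.filterMap_cons]
    by_cases h1 : ((PySem.Str.split? rec " ").getD []).getD 0 "" = "Enter"
    · simp only [h1, msg_cE, msg_gE, String.reduceEq, reduceIte, true_or, if_true]
      rw [ih]; simp
    · by_cases h2 : ((PySem.Str.split? rec " ").getD []).getD 0 "" = "Leave"
      · have h13 : ¬ (((PySem.Str.split? rec " ").getD []).getD 0 "" = "Enter" ∨
            ((PySem.Str.split? rec " ").getD []).getD 0 "" = "Change") := by rw [h2]; decide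
        simp only [h2, msg_cL, msg_gL, String.reduceEq, reduceIte, if_neg h13]
        rw [ih]; simp
      · by_cases h3 : ((PySem.Str.split? rec " ").getD []).getD 0 "" = "Change"
        · simp only [h3, msg_not "Change" (by decide) (by decide), String.reduceEq,
            reduceIte, or_true, if_true, Bool.false_eq_true, if_false]
          rw [ih]
        · have h13 : ¬ (((PySem.Str.split? rec " ").getD []).getD 0 "" = "Enter" ∨
              ((PySem.Str.split? rec " ").getD []).getD 0 "" = "Change") := fun h => h.elim h1 h3
          simp only [if_neg h1, if_neg h2, if_neg h3, if_neg h13,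
            msg_not (((PySem.Str.split? rec " ").getD []).getD 0 "") h1 h2, Bool.false_eq_true, if_false]
          rw [ih]

-- ===== VERDICT (by name: the statement is the Claim_ definition above) =====
theorem solution_spec : Claim_equal_solution := by
  intro record _ _
  unfold Spec_solution solution solution_alt
  simp only [solution_fold, List.nil_append]
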